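-- pv_equiv track=rewrite | github.com/WillP90/arrays_to_do1 | arrays_td1.py | burbank
-- ===== SOURCE A (Python) =====
-- def burbank(list1):
--     # setting a variable to catch the tallest building so far in the array
--     max_building = 0
--     # creating an empty list to append to
--     list2 = []
--     # for loop to iterate through the list
--     for i in range(len(list1)):
--         # if statement to catch if it the tallest building in sight at the moment
--         if list1[i] > max_building:
--             # if it is, appends to the new list
--             list2.append(list1[i])
--             # then replaces the tallest building in sight for the next loop iteration
--             max_building = list1[i]
--     # returning the new list with visible buildings
--     return list2
-- ===== SOURCE B (Python) =====
-- def burbank(list1):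
--     # phase 1: table of running prefix maxima seeded with 0 (prefix[i] = max of list1[:i] and 0)
--     prefix = [0]
--     for x in list1:
--         prefix.append(prefix[-1] if prefix[-1] > x else x)
--     # phase 2: keep each element strictly taller than the max of everything before it
--     return [x for x, m in zip(list1, prefix) if x > m]
-- ===== Notes on version B (the rewrite author's own statement) =====
-- stated objective: alternative
-- what changed: Replaces the fused running-max-and-append loop with two phases: first build the table of prefix maxima (seeded with 0), then a separate zip-and-filter pass keeps elements strictly greater than the max of everything before them.
import Mathlib
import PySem

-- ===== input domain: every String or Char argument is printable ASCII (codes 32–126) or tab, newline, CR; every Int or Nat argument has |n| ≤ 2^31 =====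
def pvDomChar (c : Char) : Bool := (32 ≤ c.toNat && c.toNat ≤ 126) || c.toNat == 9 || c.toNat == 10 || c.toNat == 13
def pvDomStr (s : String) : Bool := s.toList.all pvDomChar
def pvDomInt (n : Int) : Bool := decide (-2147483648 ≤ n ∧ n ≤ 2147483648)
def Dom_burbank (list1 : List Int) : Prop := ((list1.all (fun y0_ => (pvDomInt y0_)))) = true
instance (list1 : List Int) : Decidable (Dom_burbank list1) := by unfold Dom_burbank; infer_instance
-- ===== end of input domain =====

-- B builds the prefix-maxima table first, then filters in a second pass; A fuses both into one running loop.

-- ===== PORT A =====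
-- A's loop over i in range(len(list1)) reading list1[i] is ported as structural
-- recursion over the list with the same state (max_building, list2).
def burbankGo (maxBuilding : Int) (list2 : List Int) : List Int → List Int
  | [] => list2
  | x :: xs =>
    if x > maxBuilding then burbankGo x (list2 ++ [x]) xs
    else burbankGo maxBuilding list2 xs

def burbank (list1 : List Int) : List Int := burbankGo 0 [] list1

-- ===== PORT B =====
-- prefix = [0]; for x: prefix.append(prefix[-1] if prefix[-1] > x else x)
def burbankPrefix (m : Int) : List Int → List Int
  | [] => [m]
  | x :: xs => m :: burbankPrefix (if m > x then m else x) xs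

def burbank_alt (list1 : List Int) : List Int :=
  ((list1.zip (burbankPrefix 0 list1)).filter (fun p => p.1 > p.2)).map Prod.fst

-- ===== PRECONDITION & SPEC =====
def Spec_burbank (list1 : List Int) (out : List Int) : Prop := out = burbank_alt list1
instance (list1 : List Int) (out : List Int) : Decidable (Spec_burbank list1 out) := by unfold Spec_burbank; infer_instance

-- ===== CLAIM (what is proved, stated in full; the proofs are below) =====
def Claim_equal_burbank : Prop := ∀ (list1 : List Int), Dom_burbank list1 → Spec_burbank list1 (burbank list1)

-- ===== LEMMAS AND PROOFS =====
theorem burbankGo_eq (xs : List Int) : ∀ (m : Int) (acc : List Int),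
    burbankGo m acc xs
      = acc ++ ((xs.zip (burbankPrefix m xs)).filter (fun p => p.1 > p.2)).map Prod.fst := by
  induction xs with
  | nil => intro m acc; simp [burbankGo, burbankPrefix]
  | cons x xs ih =>
    intro m acc
    simp only [burbankGo, burbankPrefix, List.zip_cons_cons, List.filter_cons]
    by_cases h : x > m
    · have hmax : (if m > x then m else x) = x := by omega
      simp [h, hmax, ih x (acc ++ [x])]
    · have hmax : (if m > x then m else x) = m := by omega
      simp [h, hmax, ih m acc]

-- ===== VERDICT (by name: the statement is the Claim_ definition above) =====
theorem burbank_spec : Claim_equal_burbank := by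
  intro list1 _
  unfold Spec_burbank burbank burbank_alt
  simpa using burbankGo_eq list1 0 []
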